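-- pv_equiv track=rewrite | github.com/AnBasement/grep-python | src/pattern_parser.py | split_alternatives
-- ===== SOURCE A (Python) =====
-- def split_alternatives(pattern: str) -> list[str]:
--     """
--     Splits a pattern into alternatives using the `|` operator.
--
--     Searches through the pattern and keeps track of nested parentheses depth
--     to make sure that only the top-level `|` characters are used for splitting.
--     This is done to prevent splitting inside grouped subpatterns.
--
--     Args:
--         pattern (str): The pattern to split at top-level alternations.
--
--     Returns:
--         list[str]: A list of strings representing the separate alternatives.
--     """
--     alternatives = []
--     current_alternative = ""
--     depth = 0
--
--     for char in pattern:
--         if char == "(":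
--             depth += 1
--             current_alternative += char
--         elif char == ")":
--             depth -= 1
--             current_alternative += char
--         elif char == "|" and depth == 0:
--             alternatives.append(current_alternative)
--             current_alternative = ""
--         else:
--             current_alternative += char
--
--     alternatives.append(current_alternative)
--     return alternatives
-- ===== SOURCE B (Python) =====
-- def split_alternatives(pattern: str) -> list[str]:
--     # Pass 1: record the indices of top-level '|' characters.
--     depth = 0
--     bounds = []
--     for i, ch in enumerate(pattern):
--         if ch == "(":
--             depth += 1
--         elif ch == ")":
--             depth -= 1
--         elif ch == "|" and depth == 0:
--             bounds.append(i)
--     # Pass 2: cut the pattern at those indices by slicing.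
--     out = []
--     start = 0
--     for b in bounds + [len(pattern)]:
--         out.append(pattern[start:b])
--         start = b + 1
--     return out
-- ===== Notes on version B (the rewrite author's own statement) =====
-- stated objective: alternative
-- what changed: B replaces the per-character accumulator-string loop by a two-pass scheme: first collect the indices of top-level '|' characters, then produce the alternatives by slicing the original pattern between consecutive boundaries.
import Mathlib
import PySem

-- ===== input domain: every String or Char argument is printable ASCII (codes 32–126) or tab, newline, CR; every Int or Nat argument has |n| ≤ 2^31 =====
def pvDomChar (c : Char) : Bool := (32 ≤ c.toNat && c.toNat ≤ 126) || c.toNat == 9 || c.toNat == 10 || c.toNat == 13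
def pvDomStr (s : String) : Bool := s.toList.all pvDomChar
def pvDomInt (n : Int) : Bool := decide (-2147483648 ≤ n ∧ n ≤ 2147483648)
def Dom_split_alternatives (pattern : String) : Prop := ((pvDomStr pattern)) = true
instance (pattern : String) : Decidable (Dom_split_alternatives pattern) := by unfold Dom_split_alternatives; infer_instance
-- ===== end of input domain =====

-- B collects the indices of top-level '|' in one pass and then slices the
-- pattern between consecutive boundaries, instead of growing an accumulator
-- string per character (objective: alternative decomposition, same cost).

-- ===== PORT A =====
-- loop state: (alternatives, current_alternative (as List Char), depth)
def splitAStep (st : List (List Char) × List Char × Int) (c : Char) :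
    List (List Char) × List Char × Int :=
  if c = '(' then (st.1, st.2.1 ++ [c], st.2.2 + 1)
  else if c = ')' then (st.1, st.2.1 ++ [c], st.2.2 - 1)
  else if c = '|' ∧ st.2.2 = 0 then (st.1 ++ [st.2.1], [], st.2.2)
  else (st.1, st.2.1 ++ [c], st.2.2)

def split_alternatives (pattern : String) : List String :=
  let st := pattern.toList.foldl splitAStep ([], [], 0)
  (st.1 ++ [st.2.1]).map String.mk

-- ===== PORT B =====
-- pass 1 state: (bounds, depth)
def splitBStep (st : List Int × Int) (p : Int × Char) : List Int × Int :=
  if p.2 = '(' then (st.1, st.2 + 1)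
  else if p.2 = ')' then (st.1, st.2 - 1)
  else if p.2 = '|' ∧ st.2 = 0 then (st.1 ++ [p.1], st.2)
  else st

def split_alternatives_alt (pattern : String) : List String :=
  let cs := pattern.toList
  let bounds := ((PySem.List.enumerate cs 0).foldl splitBStep ([], 0)).1
  -- pass 2: cut at each boundary plus the sentinel final length
  let res := (bounds ++ [(cs.length : Int)]).foldl
    (fun (st : List String × Int) b =>
      (st.1 ++ [String.mk (PySem.List.slice cs (some st.2) (some b))], b + 1))
    ([], 0)
  res.1

-- ===== PRECONDITION & SPEC =====
def Spec_split_alternatives (pattern : String) (out : List String) : Prop := out = split_alternatives_alt pattern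
instance (pattern : String) (out : List String) : Decidable (Spec_split_alternatives pattern out) := by unfold Spec_split_alternatives; infer_instance

-- ===== CLAIM (what is proved, stated in full; the proofs are below) =====
def Claim_equal_split_alternatives : Prop := ∀ (pattern : String), Dom_split_alternatives pattern → Spec_split_alternatives pattern (split_alternatives pattern)

-- ===== LEMMAS AND PROOFS =====

-- common specification of the split, over List Char
def mapHead {α : Type} (f : α → α) : List α → List α
  | [] => []
  | h :: t => f h :: t

def segs : List Char → Int → List (List Char)
  | [], _ => [[]]
  | c :: rest, d =>
    if c = '(' then mapHead (c :: ·) (segs rest (d + 1))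
    else if c = ')' then mapHead (c :: ·) (segs rest (d - 1))
    else if c = '|' ∧ d = 0 then [] :: segs rest d
    else mapHead (c :: ·) (segs rest d)

theorem mapHead_id (s : List (List Char)) :
    mapHead (fun x => x) s = s := by
  cases s <;> simp [mapHead]

theorem mapHead_cons_append (cur : List Char) (c : Char) (s : List (List Char)) :
    mapHead (fun x => cur ++ (c :: x)) s = mapHead (fun x => (cur ++ [c]) ++ x) s := by
  cases s <;> simp [mapHead]

theorem mapHead_mapHead {α : Type} (f g : α → α) (s : List α) :
    mapHead f (mapHead g s) = mapHead (fun x => f (g x)) s := by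
  cases s <;> simp [mapHead]

-- A's loop computes segs
theorem splitA_loop_eq (l : List Char) :
    ∀ (alts : List (List Char)) (cur : List Char) (d : Int),
    (l.foldl splitAStep (alts, cur, d)).1 ++ [(l.foldl splitAStep (alts, cur, d)).2.1]
      = alts ++ mapHead (fun x => cur ++ x) (segs l d) := by
  induction l with
  | nil => intro alts cur d; simp [segs, mapHead]
  | cons c rest ih =>
    intro alts cur d
    by_cases h1 : c = '('
    · simp [splitAStep, segs, h1, ih, mapHead_mapHead, mapHead_cons_append]
    · by_cases h2 : c = ')'
      · simp [splitAStep, segs, h2, ih, mapHead_mapHead, mapHead_cons_append]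
      · by_cases h3 : c = '|' ∧ d = 0
        · obtain ⟨hc, hd⟩ := h3
          subst hd
          simp [splitAStep, segs, hc, ih, mapHead]
          cases segs rest (0 : Int) <;> rfl
        · simp [splitAStep, segs, h1, h2, h3, ih, mapHead_mapHead, mapHead_cons_append]

-- absolute top-level '|' positions, scanning from index i at depth d
def absB : List Char → Int → Int → List Int
  | [], _, _ => []
  | c :: rest, i, d =>
    if c = '(' then absB rest (i + 1) (d + 1)
    else if c = ')' then absB rest (i + 1) (d - 1)
    else if c = '|' ∧ d = 0 then i :: absB rest (i + 1) d
    else absB rest (i + 1) d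

-- final depth of the scan
def finD : List Char → Int → Int
  | [], d => d
  | c :: rest, d =>
    if c = '(' then finD rest (d + 1)
    else if c = ')' then finD rest (d - 1)
    else finD rest d

theorem splitB_pass1 (l : List Char) :
    ∀ (i : Int) (bs : List Int) (d : Int),
    (PySem.List.enumerate l i).foldl splitBStep (bs, d)
      = (bs ++ absB l i d, finD l d) := by
  induction l with
  | nil => intro i bs d; simp [PySem.List.enumerate_nil, absB, finD]
  | cons c rest ih =>
    intro i bs d
    rw [PySem.List.enumerate_cons]
    by_cases h1 : c = '('
    · simp [splitBStep, absB, finD, h1, ih]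
    · by_cases h2 : c = ')'
      · simp [splitBStep, absB, finD, h2, ih]
      · by_cases h3 : c = '|' ∧ d = 0
        · simp [splitBStep, absB, finD, h3, ih]
        · simp [splitBStep, absB, finD, h1, h2, h3, ih]

theorem absB_lower (l : List Char) :
    ∀ (i d b : Int), b ∈ absB l i d → i ≤ b := by
  induction l with
  | nil => intro i d b h; simp [absB] at h
  | cons c rest ih =>
    intro i d b h
    simp only [absB] at h
    split_ifs at h with h1 h2 h3
    · have := ih (i + 1) (d + 1) b h; omega
    · have := ih (i + 1) (d - 1) b h; omega
    · rcases List.mem_cons.mp h with h | h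
      · omega
      · have := ih (i + 1) d b h; omega
    · have := ih (i + 1) d b h; omega

-- recursive form of B's cutting loop
def cutR (full : List Char) : Int → List Int → List (List Char)
  | _, [] => []
  | start, b :: bs =>
      PySem.List.slice full (some start) (some b) :: cutR full (b + 1) bs

theorem splitB_pass2 (full : List Char) (bs : List Int) :
    ∀ (acc : List String) (start : Int),
    (bs.foldl
      (fun (st : List String × Int) b =>
        (st.1 ++ [String.mk (PySem.List.slice full (some st.2) (some b))], b + 1))
      (acc, start)).1
      = acc ++ (cutR full start bs).map String.mk := by
  induction bs with
  | nil => intro acc start; simp [cutR]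
  | cons b rest ih => intro acc start; simp [cutR, ih]

-- core: cutting at the collected boundaries reproduces segs
theorem cut_absB (l : List Char) :
    ∀ (i : Nat) (d : Int) (full : List Char), full.drop i = l →
    cutR full (i : Int) (absB l (i : Int) d ++ [(full.length : Int)]) = segs l d := by
  induction l with
  | nil =>
    intro i d full hdrop
    have hlen : full.length ≤ i := by
      by_contra h
      have : full.drop i ≠ [] := by
        simp [List.drop_eq_nil_iff]; omega
      exact this hdrop
    have hd : List.drop (Int.toNat (i : Int)) full = [] :=
      List.drop_eq_nil_iff.mpr (by omega)
    simp only [absB, List.nil_append, cutR, segs]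
    rw [PySem.List.slice_toNat full (by positivity) (by positivity), hd]
    simp
  | cons c rest ih =>
    intro i d full hdrop
    have hi : i < full.length := by
      by_contra h
      rw [List.drop_eq_nil_iff.mpr (by omega)] at hdrop
      exact (List.cons_ne_nil c rest) hdrop.symm
    have hrest : full.drop (i + 1) = rest := by
      have h := congrArg (List.drop 1) hdrop
      rw [List.drop_drop] at h
      simpa using h
    -- head-slice step: for i+1 ≤ b, slicing from i prepends c to slicing from i+1
    have hslice : ∀ b : Int, (i : Int) + 1 ≤ b →
        PySem.List.slice full (some (i : Int)) (some b)
          = c :: PySem.List.slice full (some ((i : Int) + 1)) (some b) := by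
      intro b hb
      rw [PySem.List.slice_toNat full (by positivity) (by omega),
          PySem.List.slice_toNat full (by omega) (by omega)]
      have h1 : ((i : Int)).toNat = i := by omega
      have h2 : ((i : Int) + 1).toNat = i + 1 := by omega
      rw [h1, h2, hdrop, hrest]
      have h3 : b.toNat - i = (b.toNat - (i + 1)) + 1 := by omega
      rw [h3, List.take_succ_cons]
    -- mapHead (c :: ·) through a nonempty cutR whose first bound is ≥ i+1
    have hcut : ∀ (bs : List Int) (hne : ∀ b ∈ bs.head?, (i : Int) + 1 ≤ b),
        bs ≠ [] →
        cutR full (i : Int) bs = mapHead (c :: ·) (cutR full ((i : Int) + 1) bs) := by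
      intro bs hne hbs
      cases bs with
      | nil => exact absurd rfl hbs
      | cons b rest' =>
        simp only [cutR, mapHead]
        rw [hslice b (hne b (by simp))]
    have hcast : ((i : Int) + 1) = ((i + 1 : Nat) : Int) := by push_cast; ring
    by_cases h1 : c = '('
    · simp only [absB, segs, if_pos h1]
      rw [hcut _ ?_ (by simp), hcast, ih (i + 1) (d + 1) full hrest]
      intro b hb
      rcases List.head?_eq_some_iff.mp hb with ⟨t, ht⟩
      have : b ∈ absB rest ((i : Int) + 1) (d + 1) ++ [(full.length : Int)] := by
        rw [ht]; simp
      rcases List.mem_append.mp this with h | h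
      · exact absB_lower rest _ _ _ h
      · simp at h; omega
    · by_cases h2 : c = ')'
      · simp only [absB, segs, if_neg h1, if_pos h2]
        rw [hcut _ ?_ (by simp), hcast, ih (i + 1) (d - 1) full hrest]
        intro b hb
        rcases List.head?_eq_some_iff.mp hb with ⟨t, ht⟩
        have : b ∈ absB rest ((i : Int) + 1) (d - 1) ++ [(full.length : Int)] := by
          rw [ht]; simp
        rcases List.mem_append.mp this with h | h
        · exact absB_lower rest _ _ _ h
        · simp at h; omega
      · by_cases h3 : c = '|' ∧ d = 0
        · simp only [absB, segs, if_neg h1, if_neg h2, if_pos h3]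
          simp only [List.cons_append, cutR]
          rw [PySem.List.slice_toNat full (by positivity) (by positivity)]
          simp only [Nat.sub_self, List.take_zero]
          rw [hcast, ih (i + 1) d full hrest]
        · simp only [absB, segs, if_neg h1, if_neg h2, if_neg h3]
          rw [hcut _ ?_ (by simp), hcast, ih (i + 1) d full hrest]
          intro b hb
          rcases List.head?_eq_some_iff.mp hb with ⟨t, ht⟩
          have : b ∈ absB rest ((i : Int) + 1) d ++ [(full.length : Int)] := by
            rw [ht]; simp
          rcases List.mem_append.mp this with h | h
          · exact absB_lower rest _ _ _ h
          · simp at h; omega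

-- ===== VERDICT (by name: the statement is the Claim_ definition above) =====
theorem split_alternatives_spec : Claim_equal_split_alternatives := by
  intro pattern _
  unfold Spec_split_alternatives split_alternatives split_alternatives_alt
  simp only
  rw [splitA_loop_eq, splitB_pass1, splitB_pass2]
  simp only [List.nil_append, mapHead_id]
  have h := cut_absB pattern.toList 0 0 pattern.toList rfl
  simp only [Nat.cast_zero] at h
  rw [h]
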